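-- pv_equiv track=rewrite | github.com/Miguel-Oliveiraa/python-cs | list05/task_e.py | sequenciarIntervalos
-- ===== SOURCE A (Python) =====
-- def sequenciarIntervalos(numeros):
--
--   # inicia um numero inicial
--   inicio = numeros[0]
--   final = inicio
--   i = 1
--
--   # executa até percorrer tudo ou o numero[i] ser diferente de numero[i+1]
--   while i < len(numeros) and numeros[i] == final + 1:
--     final = numeros[i]
--     i += 1
--
--   # concatena o numero sozinho ou o intervalo
--   if inicio == final:
--     stringDistancia = f"[{inicio}]"
--   else:
--     stringDistancia = f"[{inicio}-{final}]"
--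
--   if i < len(numeros):
--     return stringDistancia + ", " + sequenciarIntervalos(numeros[i:])
--
--   # condição de parada, i = tamanho do array
--   else:
--     return stringDistancia
-- ===== SOURCE B (Python) =====
-- def sequenciarIntervalos(numeros):
--     # One linear pass with a run-start/run-end accumulator instead of A's
--     # recursive re-scan over sliced copies of the list.
--     def fmt(a, b):
--         return f"[{a}]" if a == b else f"[{a}-{b}]"
--     partes = []
--     inicio = final = numeros[0]
--     for n in numeros[1:]:
--         if n == final + 1:
--             final = n
--         else:
--             partes.append(fmt(inicio, final))
--             inicio = final = n
--     partes.append(fmt(inicio, final))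
--     return ", ".join(partes)
-- ===== Notes on version B (the rewrite author's own statement) =====
-- stated objective: faster
-- what changed: Replaces A's recursion that re-slices the list for every run (numeros[i:]) and concatenates recursively with a single linear pass tracking the current run's start/end and joining the collected pieces once.
import Mathlib
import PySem

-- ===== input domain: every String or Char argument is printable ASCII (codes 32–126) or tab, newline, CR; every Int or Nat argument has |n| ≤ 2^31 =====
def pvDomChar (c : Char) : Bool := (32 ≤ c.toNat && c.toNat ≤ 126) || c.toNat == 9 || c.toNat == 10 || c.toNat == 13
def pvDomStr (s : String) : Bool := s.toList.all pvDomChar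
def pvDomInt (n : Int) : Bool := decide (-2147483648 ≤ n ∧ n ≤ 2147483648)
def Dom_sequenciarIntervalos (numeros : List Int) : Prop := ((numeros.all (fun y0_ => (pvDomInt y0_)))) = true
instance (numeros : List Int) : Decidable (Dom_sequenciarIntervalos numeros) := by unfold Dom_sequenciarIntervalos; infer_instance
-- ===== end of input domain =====

-- B replaces A's recursion over sliced copies of the list by one linear pass that
-- tracks the current run's start/end and accumulates the formatted pieces (objective: faster).

-- ===== PORT A =====
-- A's inner while loop: starting from `final`, consume the consecutive run;
-- returns the run's last value and the unconsumed remainder (numeros[i:]).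
def pvRunA (final : Int) (xs : List Int) : Int × List Int :=
  match xs with
  | [] => (final, [])
  | x :: rest => if x == final + 1 then pvRunA x rest else (final, x :: rest)

theorem pvRunA_length (xs : List Int) (final : Int) :
    (pvRunA final xs).2.length ≤ xs.length := by
  induction xs generalizing final with
  | nil => simp [pvRunA]
  | cons x rest ih =>
    simp only [pvRunA]
    split
    · exact Nat.le_succ_of_le (ih x)
    · simp

def sequenciarIntervalos (numeros : List Int) : String :=
  match numeros with
  | [] => ""   -- Python raises IndexError on []; excluded by Pre_
  | inicio :: rest =>
    let r := pvRunA inicio rest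
    let stringDistancia :=
      if inicio == r.1 then "[" ++ PySem.Int.toStr inicio ++ "]"
      else "[" ++ PySem.Int.toStr inicio ++ "-" ++ PySem.Int.toStr r.1 ++ "]"
    if r.2 = [] then stringDistancia
    else stringDistancia ++ ", " ++ sequenciarIntervalos r.2
termination_by numeros.length
decreasing_by
  exact Nat.lt_succ_of_le (pvRunA_length rest inicio)

-- ===== PORT B =====
def pvFmt (a b : Int) : String :=
  if a == b then "[" ++ PySem.Int.toStr a ++ "]"
  else "[" ++ PySem.Int.toStr a ++ "-" ++ PySem.Int.toStr b ++ "]"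

-- one step of B's for-loop; state = (partes, inicio, final)
def pvStep (st : List String × Int × Int) (n : Int) : List String × Int × Int :=
  if n == st.2.2 + 1 then (st.1, st.2.1, n)
  else (st.1 ++ [pvFmt st.2.1 st.2.2], n, n)

def sequenciarIntervalos_alt (numeros : List Int) : String :=
  match numeros with
  | [] => ""   -- Python raises IndexError on []; excluded by Pre_
  | inicio :: rest =>
    let st := rest.foldl pvStep ([], inicio, inicio)
    PySem.Str.join ", " (st.1 ++ [pvFmt st.2.1 st.2.2])

-- ===== PRECONDITION & SPEC =====
-- Pre_ excludes only the empty list, on which Python A (numeros[0]) raises IndexError.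
def Pre_sequenciarIntervalos (numeros : List Int) : Prop := numeros ≠ []
instance (numeros : List Int) : Decidable (Pre_sequenciarIntervalos numeros) := by
  unfold Pre_sequenciarIntervalos; infer_instance
def pvWitness_sequenciarIntervalos : List Int := ([1, 2, 3, 7, 9, 10])

def Spec_sequenciarIntervalos (numeros : List Int) (out : String) : Prop := out = sequenciarIntervalos_alt numeros
instance (numeros : List Int) (out : String) : Decidable (Spec_sequenciarIntervalos numeros out) := by unfold Spec_sequenciarIntervalos; infer_instance

-- ===== CLAIM (what is proved, stated in full; the proofs are below) =====
def Claim_equal_sequenciarIntervalos : Prop := ∀ (numeros : List Int), Dom_sequenciarIntervalos numeros → Pre_sequenciarIntervalos numeros → Spec_sequenciarIntervalos numeros (sequenciarIntervalos numeros)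

-- ===== LEMMAS AND PROOFS =====

theorem pv_join_singleton (sep p : String) : PySem.Str.join sep [p] = p := by
  apply String.toList_inj.mp
  simp [PySem.Str.toList_join, PySem.Chars.join_singleton]

theorem pv_join_cons (sep a : String) (l : List String) (h : l ≠ []) :
    PySem.Str.join sep (a :: l) = a ++ sep ++ PySem.Str.join sep l := by
  cases l with
  | nil => exact absurd rfl h
  | cons b bs =>
    apply String.toList_inj.mp
    simp [PySem.Str.toList_join, PySem.Chars.join_cons_cons, String.toList_append]

-- B's accumulator distributes: the already-collected pieces are only appended to.
theorem pvStep_acc (xs : List Int) (partes : List String) (i f : Int) :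
    xs.foldl pvStep (partes, i, f) =
      (partes ++ (xs.foldl pvStep ([], i, f)).1, (xs.foldl pvStep ([], i, f)).2) := by
  induction xs generalizing partes i f with
  | nil => simp
  | cons x rest ih =>
    simp only [List.foldl_cons, pvStep]
    split
    · exact ih partes i x
    · simp only [List.nil_append]
      rw [ih (partes ++ [pvFmt i f]) x x, ih [pvFmt i f] x x]
      simp

-- relation between A's run scanner and B's fold
theorem pv_run_fold (xs : List Int) (i0 prev : Int) :
    ((pvRunA prev xs).2 = [] → xs.foldl pvStep ([], i0, prev) = ([], i0, (pvRunA prev xs).1)) ∧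
    (∀ t ts, (pvRunA prev xs).2 = t :: ts →
      xs.foldl pvStep ([], i0, prev) =
        (pvFmt i0 (pvRunA prev xs).1 :: (ts.foldl pvStep ([], t, t)).1,
         (ts.foldl pvStep ([], t, t)).2)) := by
  induction xs generalizing i0 prev with
  | nil => simp [pvRunA]
  | cons x rest ih =>
    by_cases hx : x = prev + 1
    · have hA : pvRunA prev (x :: rest) = pvRunA x rest := by simp [pvRunA, hx]
      have hF : (x :: rest).foldl pvStep ([], i0, prev) = rest.foldl pvStep ([], i0, x) := by
        simp [pvStep, hx]
      rw [hA, hF]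
      exact ih i0 x
    · have hA : pvRunA prev (x :: rest) = (prev, x :: rest) := by simp [pvRunA, hx]
      have hF : (x :: rest).foldl pvStep ([], i0, prev) =
          rest.foldl pvStep ([pvFmt i0 prev], x, x) := by
        simp [pvStep, hx]
      constructor
      · intro h; rw [hA] at h; exact absurd h (by simp)
      · intro t ts h
        rw [hA] at h
        have h' : x = t ∧ rest = ts := by simpa using h
        obtain ⟨rfl, rfl⟩ := h'
        rw [hF, pvStep_acc rest [pvFmt i0 prev] x x, hA]
        simp

theorem pv_main (n : Nat) (xs : List Int) (inicio : Int) (hn : xs.length ≤ n) :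
    sequenciarIntervalos (inicio :: xs) = sequenciarIntervalos_alt (inicio :: xs) := by
  induction n generalizing xs inicio with
  | zero =>
    have : xs = [] := List.eq_nil_of_length_eq_zero (Nat.le_zero.mp hn)
    subst this
    simp [sequenciarIntervalos, sequenciarIntervalos_alt, pvRunA, pv_join_singleton, pvFmt]
  | succ n ih =>
    rcases h2 : (pvRunA inicio xs).2 with _ | ⟨t, ts⟩
    · -- single run: both produce one formatted piece
      rw [sequenciarIntervalos, sequenciarIntervalos_alt]
      simp only [h2, (pv_run_fold xs inicio inicio).1 h2]
      simp [pv_join_singleton, pvFmt]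
    · -- a break at t: peel the first piece off both sides, recurse on the tail
      have hlen : (t :: ts).length ≤ xs.length := h2 ▸ pvRunA_length xs inicio
      have hts : ts.length ≤ n := by simp at hlen; omega
      rw [sequenciarIntervalos, sequenciarIntervalos_alt]
      simp only [h2, (pv_run_fold xs inicio inicio).2 t ts h2]
      rw [if_neg (by simp)]
      have hne : (ts.foldl pvStep ([], t, t)).1 ++ [pvFmt (ts.foldl pvStep ([], t, t)).2.1 (ts.foldl pvStep ([], t, t)).2.2] ≠ [] := by simp
      rw [List.cons_append, pv_join_cons ", " (pvFmt inicio (pvRunA inicio xs).1) _ hne]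
      rw [ih ts t hts]
      rw [sequenciarIntervalos_alt]
      rfl

-- ===== VERDICT (by name: the statement is the Claim_ definition above) =====
theorem sequenciarIntervalos_spec : Claim_equal_sequenciarIntervalos := by
  intro numeros _ hpre
  unfold Spec_sequenciarIntervalos
  cases numeros with
  | nil => exact absurd rfl hpre
  | cons inicio xs => exact pv_main xs.length xs inicio le_rfl
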